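-- pv_equiv track=rewrite | github.com/luisquesada/skills-introduction-to-github | Info.py | findDuplicateCharacters
-- ===== SOURCE A (Python) =====
-- def findDuplicateCharacters(s):
--     # Create a dictionary to store the frequency of each character
--     charFrequency = {}
--     # Create a list to store the duplicate characters
--     duplicateCharacters = []
--     # Iterate through the string
--     for char in s:
--         # If the character is already in the dictionary, increment its frequency by 1
--         if char in charFrequency:
--             charFrequency[char] += 1
--             # If the frequency of the character is 2, add it to the list of duplicate characters
--             if charFrequency[char] == 2:
--                 duplicateCharacters.append(char)
--         # If the character is not in the dictionary, add it with a frequency of 1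
--         else:
--             charFrequency[char] = 1
--     # Return the list of duplicate characters
--     return duplicateCharacters
-- ===== SOURCE B (Python) =====
-- def findDuplicateCharacters(s):
--     # For each distinct character, locate its second occurrence with two find() scans;
--     # then sort those positions to recover the order in which duplicates are detected.
--     seconds = []
--     for c in dict.fromkeys(s):          # distinct characters, first-occurrence order
--         second = s.find(c, s.find(c) + 1)
--         if second != -1:
--             seconds.append((second, c))
--     seconds.sort(key=lambda p: p[0])
--     return [c for _, c in seconds]
-- ===== Notes on version B (the rewrite author's own statement) =====
-- stated objective: faster
-- what changed: Replaces the online frequency-counter pass (emit when a count reaches 2) by a staged scan-and-sort: for each distinct character two C-level find() scans locate its second occurrence, and those positions are sorted to recover the emission order.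
import Mathlib
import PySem

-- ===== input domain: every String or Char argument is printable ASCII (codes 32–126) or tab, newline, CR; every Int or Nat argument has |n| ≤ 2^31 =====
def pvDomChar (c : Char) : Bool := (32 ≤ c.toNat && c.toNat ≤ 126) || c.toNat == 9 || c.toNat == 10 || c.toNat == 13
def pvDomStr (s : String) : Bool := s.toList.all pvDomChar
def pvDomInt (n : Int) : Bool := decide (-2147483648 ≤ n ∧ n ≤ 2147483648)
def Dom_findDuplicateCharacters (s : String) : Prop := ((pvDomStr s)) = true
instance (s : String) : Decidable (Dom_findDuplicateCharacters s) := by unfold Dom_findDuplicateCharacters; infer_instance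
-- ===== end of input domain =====

-- B replaces the online frequency-counter pass by a staged scan-and-sort: per distinct character two find() scans locate its second occurrence, and those positions are sorted (measured faster: C-level scans instead of a per-character Python loop).


-- ===== PORT A =====
-- loop over the string: frequency dict + duplicate list, append when a count reaches 2
def pvLoopA : List Char → PySem.Dict Char Int → List String → List String
  | [], _, dup => dup
  | c :: rest, freq, dup =>
    if freq.contains c then
      let freq' := freq.insert c (freq.getD c 0 + 1)
      let dup' := if freq'.getD c 0 = 2 then dup ++ [String.ofList [c]] else dup
      pvLoopA rest freq' dup'
    else
      pvLoopA rest (freq.insert c 1) dup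

def findDuplicateCharacters (s : String) : List String :=
  pvLoopA s.toList PySem.Dict.empty []

-- ===== PORT B =====
-- staged: for each distinct char two find() scans locate its second occurrence; sort those positions
def findDuplicateCharacters_alt (s : String) : List String :=
  let seconds := (PySem.List.dedup s.toList).foldl
    (fun acc c =>
      let second := PySem.Chars.findFrom s.toList [c] (PySem.Chars.find s.toList [c] + 1) none
      if second ≠ -1 then acc ++ [(second, c)] else acc) []
  (PySem.List.sorted seconds (fun p => p.1) false).map (fun p => String.ofList [p.2])

-- ===== PRECONDITION & SPEC =====
def Spec_findDuplicateCharacters (s : String) (out : List String) : Prop := out = findDuplicateCharacters_alt s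
instance (s : String) (out : List String) : Decidable (Spec_findDuplicateCharacters s out) := by unfold Spec_findDuplicateCharacters; infer_instance

-- ===== CLAIM (what is proved, stated in full; the proofs are below) =====
def Claim_equal_findDuplicateCharacters : Prop := ∀ (s : String), Dom_findDuplicateCharacters s → Spec_findDuplicateCharacters s (findDuplicateCharacters s)

-- ===== LEMMAS AND PROOFS =====

-- abbreviations used only by the proofs
def pvF (ic : Int × Char) : String := String.ofList [ic.2]

-- A's kept pairs: index i whose strict prefix counts s[i] exactly once
def pvLA (l : List Char) : List (Int × Char) :=
  (PySem.List.enumerate l).filter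
    (fun ic => (PySem.List.slice l none (some ic.1)).count ic.2 == 1)

def pvSecond (l : List Char) (c : Char) : Int :=
  PySem.Chars.findFrom l [c] (PySem.Chars.find l [c] + 1) none

def pvSeconds (l : List Char) : List (Int × Char) :=
  ((PySem.List.dedup l).filter (fun c => decide (pvSecond l c ≠ -1))).map
    (fun c => (pvSecond l c, c))

-- "k is the second occurrence of c in l"
def pvIsSecond (l : List Char) (k : Nat) (c : Char) : Prop :=
  ∃ _ : k < l.length, l[k]! = c ∧ (l.take k).count c = 1

-- reference recursion shared by both directions of the A-side rewriting
def pvSpec : List Char → List Char → List String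
  | _, [] => []
  | pre, c :: rest =>
    (if pre.count c = 1 then [String.ofList [c]] else []) ++ pvSpec (pre ++ [c]) rest

theorem pvLoopA_eq (l : List Char) : ∀ (pre : List Char) (freq : PySem.Dict Char Int)
    (acc : List String),
    (∀ c, freq.contains c = pre.contains c) → (∀ c, freq.getD c 0 = pre.count c) →
    pvLoopA l freq acc = acc ++ pvSpec pre l := by
  induction l with
  | nil => intro pre freq acc _ _; simp [pvLoopA, pvSpec]
  | cons c rest ih =>
    intro pre freq acc hc hg
    have hcount : freq.getD c 0 = pre.count c := hg c
    have hcontains' : ∀ c' : Char,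
        (freq.insert c (freq.getD c 0 + 1)).contains c' = (pre ++ [c]).contains c' := by
      intro c'
      rw [PySem.Dict.contains_insert, hc c']
      by_cases h : c' = c <;> simp [h]
    have hgetD' : ∀ c' : Char,
        (freq.insert c (freq.getD c 0 + 1)).getD c' 0 = (pre ++ [c]).count c' := by
      intro c'
      rw [PySem.Dict.getD_insert, List.count_append]
      by_cases h : c' = c
      · subst h; simp [hcount]
      · simp [h, Ne.symm h, hg c']
    by_cases h : freq.contains c = true
    · have hmem : pre.contains c = true := (hc c) ▸ h
      have hpos : 1 ≤ pre.count c := by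
        have : c ∈ pre := by simpa using hmem
        exact List.one_le_count_iff.mpr this
      rw [pvLoopA, if_pos h]
      simp only [PySem.Dict.getD_insert_self]
      by_cases h2 : pre.count c = 1
      · rw [if_pos (by omega), pvSpec, if_pos h2,
          ih (pre ++ [c]) _ _ hcontains' hgetD']
        simp
      · rw [if_neg (by omega), pvSpec, if_neg h2,
          ih (pre ++ [c]) _ _ hcontains' hgetD']
        simp
    · have hmem : pre.contains c = false := by rw [← hc c]; simpa using h
      have hzero : pre.count c = 0 := List.count_eq_zero.mpr (by simpa using hmem)
      have hcount0 : freq.getD c 0 = 0 := by simp [hcount, hzero]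
      rw [pvLoopA, if_neg h, pvSpec, if_neg (by omega)]
      have h1 : freq.insert c 1 = freq.insert c (freq.getD c 0 + 1) := by
        rw [hcount0, zero_add]
      rw [h1, ih (pre ++ [c]) _ _ hcontains' hgetD']
      simp

theorem pvSpec_eq_filter (full : List Char) : ∀ (l : List Char) (k : Nat), full.drop k = l →
    ((PySem.List.enumerate l (k : Int)).filter
        (fun ic => (PySem.List.slice full none (some ic.1)).count ic.2 == 1)).map pvF
      = pvSpec (full.take k) l := by
  intro l
  induction l with
  | nil => intro k _; simp [PySem.List.enumerate_nil, pvSpec]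
  | cons c rest ih =>
    intro k hk
    have hget : full[k]? = some c := by
      have : (full.drop k)[0]? = some c := by rw [hk]; rfl
      simpa using this
    have htake : full.take (k + 1) = full.take k ++ [c] := by
      rw [List.take_add_one, hget]; rfl
    have hdrop : full.drop (k + 1) = rest := by
      have : (full.drop k).drop 1 = rest := by rw [hk]; rfl
      simpa [List.drop_drop] using this
    rw [PySem.List.enumerate_cons]
    have hslice : PySem.List.slice full none (some (k : Int)) = full.take k :=
      PySem.List.slice_to_natCast full k
    have hcast : (k : Int) + 1 = ((k + 1 : Nat) : Int) := by push_cast; ring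
    by_cases hcnt : (full.take k).count c = 1
    · rw [List.filter_cons_of_pos (by simp [hslice, hcnt]), List.map_cons,
        pvSpec, if_pos hcnt, hcast, ih (k + 1) hdrop, htake]
      rfl
    · rw [List.filter_cons_of_neg (by simp [hslice, hcnt]),
        pvSpec, if_neg hcnt, hcast, ih (k + 1) hdrop, htake]
      rfl

-- [c] is a prefix of l.drop k iff l[k]? = some c
theorem pvSingleton_prefix_drop (l : List Char) (k : Nat) (c : Char) :
    [c] <+: l.drop k ↔ l[k]? = some c := by
  have h0 : (l.drop k)[0]? = l[k]? := by simp
  constructor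
  · rintro ⟨u, hu⟩
    rw [← h0, ← hu]; rfl
  · intro h
    have hk : k < l.length := by
      by_contra hk
      rw [Nat.not_lt] at hk
      simp [List.getElem?_eq_none hk] at h
    have hdrop : l.drop k = l[k] :: l.drop (k + 1) := List.drop_eq_getElem_cons hk
    have hc : l[k] = c := by
      have h2 := (List.getElem?_eq_getElem hk).symm.trans h
      exact Option.some.inj h2
    exact ⟨l.drop (k + 1), by rw [hdrop, hc]; rfl⟩

theorem pvCount_take_succ (l : List Char) (n : Nat) (c : Char) (h : n < l.length) :
    (l.take (n + 1)).count c = (l.take n).count c + if l[n] = c then 1 else 0 := by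
  rw [List.take_add_one, List.getElem?_eq_getElem h]
  simp only [Option.toList_some, List.count_append]
  by_cases hc : l[n] = c <;> simp [hc]

theorem pvCount_take_congr (l : List Char) (c : Char) (m m' : Nat) (hmm : m ≤ m')
    (h : ∀ k, m ≤ k → k < m' → l[k]? ≠ some c) :
    (l.take m').count c = (l.take m).count c := by
  induction m', hmm using Nat.le_induction with
  | base => rfl
  | succ m' hmm ih =>
    by_cases hlen : m' < l.length
    · have hne : l[m'] ≠ c := by
        intro hc
        exact h m' hmm (Nat.lt_succ_self m') (by rw [List.getElem?_eq_getElem hlen, hc])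
      rw [pvCount_take_succ l m' c hlen, if_neg hne, add_zero]
      exact ih (fun k hk hk' => h k hk (Nat.lt_succ_of_lt hk'))
    · rw [Nat.not_lt] at hlen
      rw [List.take_of_length_le (by omega)]
      have h2 := ih (fun k hk hk' => h k hk (Nat.lt_succ_of_lt hk'))
      rw [List.take_of_length_le hlen] at h2
      exact h2

theorem pvIsSecond_unique (l : List Char) (i j : Nat) (c : Char)
    (hi : pvIsSecond l i c) (hj : pvIsSecond l j c) : i = j := by
  obtain ⟨hi1, hi2, hi3⟩ := hi
  obtain ⟨hj1, hj2, hj3⟩ := hj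
  rw [getElem!_pos l i hi1] at hi2
  rw [getElem!_pos l j hj1] at hj2
  by_contra hne
  rcases Nat.lt_or_ge i j with hlt | hge
  · have h2 : (l.take (i + 1)).count c = 2 := by
      rw [pvCount_take_succ l i c hi1, if_pos hi2, hi3]
    have hsub : (l.take (i + 1)).Sublist (l.take j) := by
      have : l.take (i + 1) = (l.take j).take (i + 1) := by
        rw [List.take_take, Nat.min_eq_left (by omega)]
      rw [this]; exact List.take_sublist _ _
    have := hsub.count_le c
    omega
  · have hlt : j < i := by omega
    have h2 : (l.take (j + 1)).count c = 2 := by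
      rw [pvCount_take_succ l j c hj1, if_pos hj2, hj3]
    have hsub : (l.take (j + 1)).Sublist (l.take i) := by
      have : l.take (j + 1) = (l.take i).take (j + 1) := by
        rw [List.take_take, Nat.min_eq_left (by omega)]
      rw [this]; exact List.take_sublist _ _
    have := hsub.count_le c
    omega

theorem pvMem_pvLA (l : List Char) (p : Int × Char) :
    p ∈ pvLA l ↔ ∃ k : Nat, p.1 = (k : Int) ∧ pvIsSecond l k p.2 := by
  unfold pvLA
  rw [List.mem_filter, PySem.List.mem_enumerate_iff]
  constructor
  · rintro ⟨⟨k, hk, hp⟩, hcond⟩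
    refine ⟨k, by rw [hp]; simp, hk, ?_, ?_⟩
    · rw [hp, getElem!_pos l k hk]
    · have hp2 : p.2 = l[k] := by rw [hp]
      rw [hp] at hcond
      rw [hp2]
      simp only [zero_add, PySem.List.slice_to_natCast] at hcond
      simpa using hcond
  · rintro ⟨k, hp1, hk, h2, h3⟩
    rw [getElem!_pos l k hk] at h2
    have hp : p = ((0 : Int) + k, l[k]) := by
      cases p
      simp_all
    refine ⟨⟨k, hk, hp⟩, ?_⟩
    have hp2 : p.2 = l[k] := by rw [hp]
    rw [hp2] at h3
    rw [hp]
    simp only [zero_add, PySem.List.slice_to_natCast]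
    simpa using h3

-- first occurrence: what find l [c] points at
theorem pvFind_first (l : List Char) (c : Char) (hc : c ∈ l) :
    0 ≤ PySem.Chars.find l [c] ∧ (PySem.Chars.find l [c]).toNat < l.length ∧
      l[(PySem.Chars.find l [c]).toNat]! = c ∧
      (∀ i, i < (PySem.Chars.find l [c]).toNat → l[i]? ≠ some c) ∧
      (l.take (PySem.Chars.find l [c]).toNat).count c = 0 := by
  have hinf : [c] <:+: l := by
    obtain ⟨n, hn, he⟩ := List.mem_iff_getElem.mp hc
    have hpre : [c] <+: l.drop n := (pvSingleton_prefix_drop l n c).mpr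
      (by rw [List.getElem?_eq_getElem hn, he])
    exact (PySem.Chars.isIn_iff_infix [c] l).mp
      ((PySem.Chars.exists_prefix_drop_iff_isIn [c] l).mp ⟨n, hpre⟩)
  have hf0 : 0 ≤ PySem.Chars.find l [c] := (PySem.Chars.find_nonneg_iff l [c]).mpr hinf
  obtain ⟨hpre, hmin⟩ := PySem.Chars.find_spec hf0
  have hfget : l[(PySem.Chars.find l [c]).toNat]? = some c :=
    (pvSingleton_prefix_drop l _ c).mp hpre
  have hflen : (PySem.Chars.find l [c]).toNat < l.length := by
    by_contra hlen
    rw [Nat.not_lt] at hlen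
    simp [List.getElem?_eq_none hlen] at hfget
  have hmin' : ∀ i, i < (PySem.Chars.find l [c]).toNat → l[i]? ≠ some c := by
    intro i hi hieq
    exact hmin i hi ((pvSingleton_prefix_drop l i c).mpr hieq)
  refine ⟨hf0, hflen, ?_, hmin', ?_⟩
  · rw [getElem!_pos l _ hflen]
    exact Option.some.inj ((List.getElem?_eq_getElem hflen).symm.trans hfget)
  · rw [pvCount_take_congr l c 0 _ (Nat.zero_le _) (fun k _ hk => hmin' k hk)]
    simp

theorem pvSecond_spec (l : List Char) (c : Char) (hc : c ∈ l) (h : pvSecond l c ≠ -1) :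
    0 ≤ pvSecond l c ∧ pvIsSecond l (pvSecond l c).toNat c := by
  obtain ⟨hf0, hflen, hfc, hfmin, hfcnt⟩ := pvFind_first l c hc
  have hcast : PySem.Chars.find l [c] + 1
      = (((PySem.Chars.find l [c]).toNat + 1 : Nat) : Int) := by omega
  have hj : pvSecond l c
      = PySem.Chars.findFrom l [c] (((PySem.Chars.find l [c]).toNat + 1 : Nat) : Int) none := by
    rw [pvSecond, hcast]
  have hk1 : (PySem.Chars.find l [c]).toNat + 1 ≤ l.length := hflen
  have h' : PySem.Chars.findFrom l [c] (((PySem.Chars.find l [c]).toNat + 1 : Nat) : Int) none ≠ -1 := by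
    rw [← hj]; exact h
  obtain ⟨hge, hpre2, hmin2⟩ := PySem.Chars.findFrom_natCast_spec l [c] _ hk1 h'
  rw [← hj] at hge hpre2 hmin2
  have hj0 : 0 ≤ pvSecond l c := by omega
  have hjget : l[(pvSecond l c).toNat]? = some c := (pvSingleton_prefix_drop l _ c).mp hpre2
  have hjlen : (pvSecond l c).toNat < l.length := by
    by_contra hlen
    rw [Nat.not_lt] at hlen
    simp [List.getElem?_eq_none hlen] at hjget
  have hjle : (PySem.Chars.find l [c]).toNat + 1 ≤ (pvSecond l c).toNat := by omega
  refine ⟨hj0, hjlen, ?_, ?_⟩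
  · rw [getElem!_pos l _ hjlen]
    exact Option.some.inj ((List.getElem?_eq_getElem hjlen).symm.trans hjget)
  · have hnomid : ∀ k, (PySem.Chars.find l [c]).toNat + 1 ≤ k → k < (pvSecond l c).toNat →
        l[k]? ≠ some c := by
      intro k hk hk' hke
      exact hmin2 k (by omega) hk' ((pvSingleton_prefix_drop l k c).mpr hke)
    rw [pvCount_take_congr l c _ _ hjle hnomid,
      pvCount_take_succ l _ c hflen, hfcnt]
    rw [getElem!_pos l _ hflen] at hfc
    rw [if_pos hfc]

theorem pvSecond_ne_neg_one (l : List Char) (c : Char) (k : Nat) (hk : pvIsSecond l k c) :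
    pvSecond l c ≠ -1 ∧ pvSecond l c = (k : Int) := by
  obtain ⟨hklen, hkc, hkcnt⟩ := hk
  rw [getElem!_pos l k hklen] at hkc
  have hc : c ∈ l := hkc ▸ List.getElem_mem hklen
  obtain ⟨hf0, hflen, hfc, hfmin, hfcnt⟩ := pvFind_first l c hc
  rw [getElem!_pos l _ hflen] at hfc
  -- the first occurrence is strictly before k
  have hfk : (PySem.Chars.find l [c]).toNat < k := by
    rcases Nat.lt_trichotomy (PySem.Chars.find l [c]).toNat k with h | h | h
    · exact h
    · exfalso
      rw [← h] at hkcnt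
      omega
    · exfalso
      exact hfmin k h (by rw [List.getElem?_eq_getElem hklen, hkc])
  have hcast : PySem.Chars.find l [c] + 1
      = (((PySem.Chars.find l [c]).toNat + 1 : Nat) : Int) := by omega
  have hk1 : (PySem.Chars.find l [c]).toNat + 1 ≤ l.length := hflen
  have hne : pvSecond l c ≠ -1 := by
    rw [pvSecond, hcast]
    intro heq
    have hno := (PySem.Chars.findFrom_natCast_eq_neg_one_iff l [c] _ hk1).mp heq
    apply hno
    have hdk : [c] <+: l.drop k := (pvSingleton_prefix_drop l k c).mpr
      (by rw [List.getElem?_eq_getElem hklen, hkc])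
    have hdd : l.drop k
        = (l.drop ((PySem.Chars.find l [c]).toNat + 1)).drop (k - ((PySem.Chars.find l [c]).toNat + 1)) := by
      rw [List.drop_drop]
      congr 1
      omega
    rw [hdd] at hdk
    exact (PySem.Chars.isIn_iff_infix [c] _).mp
      ((PySem.Chars.exists_prefix_drop_iff_isIn [c] _).mp ⟨_, hdk⟩)
  obtain ⟨hj0, hjsec⟩ := pvSecond_spec l c hc hne
  have := pvIsSecond_unique l _ k c hjsec ⟨hklen, by rw [getElem!_pos l k hklen]; exact hkc, hkcnt⟩
  refine ⟨hne, by omega⟩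

theorem pvMem_pvSeconds (l : List Char) (p : Int × Char) :
    p ∈ pvSeconds l ↔ ∃ k : Nat, p.1 = (k : Int) ∧ pvIsSecond l k p.2 := by
  unfold pvSeconds
  rw [List.mem_map]
  constructor
  · rintro ⟨c', hc', hp⟩
    rw [List.mem_filter] at hc'
    obtain ⟨hmemd, hcond⟩ := hc'
    have hcond' : pvSecond l c' ≠ -1 := by simpa using hcond
    have hcl : c' ∈ l := (PySem.List.mem_dedup l c').mp hmemd
    obtain ⟨hj0, hsec⟩ := pvSecond_spec l c' hcl hcond'
    have hp1 : p.1 = pvSecond l c' := by rw [← hp]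
    have hp2 : p.2 = c' := by rw [← hp]
    refine ⟨(pvSecond l c').toNat, ?_, ?_⟩
    · rw [hp1]; omega
    · rw [hp2]; exact hsec
  · rintro ⟨k, hp1, hsec⟩
    obtain ⟨hklen, hkc, hkcnt⟩ := hsec
    have hcl : p.2 ∈ l := by
      rw [getElem!_pos l k hklen] at hkc
      exact hkc ▸ List.getElem_mem hklen
    obtain ⟨hne, heq⟩ := pvSecond_ne_neg_one l p.2 k ⟨hklen, hkc, hkcnt⟩
    refine ⟨p.2, ?_, ?_⟩
    · rw [List.mem_filter]
      exact ⟨(PySem.List.mem_dedup l p.2).mpr hcl, by simp [hne]⟩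
    · cases p
      simp_all

theorem pvSorted_seconds (l : List Char) :
    PySem.List.sorted (pvSeconds l) (fun p => p.1) false = pvLA l := by
  have hpair : (pvLA l).Pairwise (fun p q => p.1 < q.1) := by
    unfold pvLA
    exact (PySem.List.pairwise_lt_enumerate _ _).filter _
  have hnA : (pvLA l).Nodup :=
    hpair.imp (fun h he => by rw [he] at h; exact lt_irrefl _ h)
  have hnB : (pvSeconds l).Nodup := by
    unfold pvSeconds
    apply List.Nodup.map_on
    · intro x _ y _ hxy
      exact congrArg Prod.snd hxy
    · exact (PySem.List.nodup_dedup l).filter _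
  have hperm : (pvLA l).Perm (pvSeconds l) :=
    (List.perm_ext_iff_of_nodup hnA hnB).mpr
      (fun p => (pvMem_pvLA l p).trans (pvMem_pvSeconds l p).symm)
  exact PySem.List.sorted_eq_of_perm_of_pairwise_lt (pvSeconds l) (pvLA l) _ hperm hpair

theorem pvAlt_eq (s : String) :
    findDuplicateCharacters_alt s
      = (PySem.List.sorted (pvSeconds s.toList) (fun p => p.1) false).map pvF := by
  unfold findDuplicateCharacters_alt
  have hB : (PySem.List.dedup s.toList).foldl
      (fun acc c =>
        let second := PySem.Chars.findFrom s.toList [c] (PySem.Chars.find s.toList [c] + 1) none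
        if second ≠ -1 then acc ++ [(second, c)] else acc) ([] : List (Int × Char))
      = pvSeconds s.toList := by
    have := PySem.List.foldl_append_ite (l := PySem.List.dedup s.toList)
      (p := fun c => pvSecond s.toList c ≠ -1)
      (f := fun c => (pvSecond s.toList c, c)) (acc := ([] : List (Int × Char)))
    simpa [pvSecond, pvSeconds] using this
  simp only [hB]
  rfl

-- ===== VERDICT (by name: the statement is the Claim_ definition above) =====
theorem findDuplicateCharacters_spec : Claim_equal_findDuplicateCharacters := by
  intro s _
  unfold Spec_findDuplicateCharacters findDuplicateCharacters
  have ha : pvLoopA s.toList PySem.Dict.empty [] = pvSpec [] s.toList := by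
    rw [pvLoopA_eq s.toList [] PySem.Dict.empty []
      (by intro c; simp [PySem.Dict.contains_empty])
      (by intro c; simp [PySem.Dict.getD_of_not_contains _ _ (PySem.Dict.contains_empty c)])]
    simp
  have hfil := pvSpec_eq_filter s.toList s.toList 0 (by simp)
  simp only [Nat.cast_zero, List.take_zero] at hfil
  rw [pvAlt_eq, pvSorted_seconds, ha, ← hfil]
  rfl
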